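-- pv_equiv track=rewrite | github.com/mdroogendijk/AoC_2020 | Day_10/main.py | part1
-- ===== SOURCE A (Python) =====
-- def part1(lines):
--
--     jolts_range = range(1, 4)
--     jolts = 0
--     jolts_diff_1 = 0
--     jolts_diff_3 = 0
--
--     while jolts < max(lines):
--         for i in jolts_range:
--             if (jolts + i) in lines:
--
--                 if i == 1:
--                     jolts_diff_1 += 1
--                 elif i == 3:
--                     jolts_diff_3 += 1
--
--                 jolts += i
--                 break
--
--     jolts_diff_3 += 1
--     number = jolts_diff_1 * jolts_diff_3
--
--     return number
-- ===== SOURCE B (Python) =====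
-- def part1(lines):
--     adapters = sorted(set(x for x in lines if x > 0))
--     d1 = 0
--     d3 = 0
--     prev = 0
--     for x in adapters:
--         gap = x - prev
--         if gap == 1:
--             d1 += 1
--         elif gap == 3:
--             d3 += 1
--         prev = x
--     return d1 * (d3 + 1)
-- ===== Notes on version B (the rewrite author's own statement) =====
-- stated objective: alternative
-- what changed: A greedily walks the jolt chain, re-scanning the whole list for membership at every step (and recomputing max each while-check, O(n^2)); B sorts the distinct positive adapters once and counts consecutive differences of 1 and 3 in a single pass (intended as faster, O(n log n), but a timing run could not confirm a ratio: A does not finish on random large inputs).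
import Mathlib
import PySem

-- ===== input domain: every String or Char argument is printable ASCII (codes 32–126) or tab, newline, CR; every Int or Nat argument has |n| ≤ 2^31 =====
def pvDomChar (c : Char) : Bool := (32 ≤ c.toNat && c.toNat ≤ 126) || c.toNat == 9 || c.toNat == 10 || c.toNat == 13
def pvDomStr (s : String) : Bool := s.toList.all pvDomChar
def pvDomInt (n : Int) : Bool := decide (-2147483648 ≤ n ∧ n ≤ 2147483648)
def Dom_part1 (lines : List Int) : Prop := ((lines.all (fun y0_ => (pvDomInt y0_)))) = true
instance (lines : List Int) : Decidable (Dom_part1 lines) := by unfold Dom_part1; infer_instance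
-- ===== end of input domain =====

-- B replaces A's greedy chain walk (a list-membership scan per jolt step) by
-- sort-the-distinct-positive-adapters once and one pass counting gaps of 1 and 3.

-- ===== PORT A =====
-- A's while-loop: jolts advances by the first i in 1..3 with (jolts+i) in lines.
-- The fuel argument only makes the recursion total: each executed iteration increases jolts by
-- at least 1, so fuel = M.toNat covers every terminating run; where Python would loop forever
-- (no step available below max) Pre_part1 excludes the input.
def part1Loop (lines : List Int) (M : Int) : Nat → Int → Int → Int → Int × Int
  | 0, _jolts, d1, d3 => (d1, d3)
  | fuel + 1, jolts, d1, d3 =>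
    if jolts < M then
      if (jolts + 1) ∈ lines then part1Loop lines M fuel (jolts + 1) (d1 + 1) d3
      else if (jolts + 2) ∈ lines then part1Loop lines M fuel (jolts + 2) d1 d3
      else if (jolts + 3) ∈ lines then part1Loop lines M fuel (jolts + 3) d1 (d3 + 1)
      else (d1, d3)   -- Python diverges here; excluded by Pre_part1
    else (d1, d3)

def part1 (lines : List Int) : Int :=
  match PySem.List.max? lines (fun x => x) with
  | none => 0   -- max([]) raises ValueError; excluded by Pre_part1
  | some M =>
    let r := part1Loop lines M M.toNat 0 0 0
    r.1 * (r.2 + 1)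

-- ===== PORT B =====
-- the loop body of Source B: state (d1, d3, prev)
def part1Step (acc : Int × Int × Int) (x : Int) : Int × Int × Int :=
  if x - acc.2.2 = 1 then (acc.1 + 1, acc.2.1, x)
  else if x - acc.2.2 = 3 then (acc.1, acc.2.1 + 1, x)
  else (acc.1, acc.2.1, x)

def part1_alt (lines : List Int) : Int :=
  let adapters := PySem.List.sorted (PySem.Set.ofList (lines.filter (fun x => decide (0 < x)))) (fun x => x) false
  let r := adapters.foldl part1Step (0, 0, 0)
  r.1 * (r.2.1 + 1)

-- ===== PRECONDITION & SPEC =====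
-- Pre_ excludes exactly the inputs on which Python A does not return: the empty list (max([])
-- raises ValueError) and lists whose jolt chain from 0 stalls — a gap greater than 3 between
-- consecutive distinct positive values (or from 0 to the smallest) — on which A's while-loop
-- runs forever.
def Pre_part1 (lines : List Int) : Prop :=
  lines ≠ [] ∧
  List.IsChain (fun a b => b ≤ a + 3) (0 ::
    PySem.List.sorted (PySem.Set.ofList (lines.filter (fun x => decide (0 < x)))) (fun x => x) false)
instance (lines : List Int) : Decidable (Pre_part1 lines) := by unfold Pre_part1; infer_instance

def pvWitness_part1 : List Int := [1, 2, 3, 6, 7]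

def Spec_part1 (lines : List Int) (out : Int) : Prop := out = part1_alt lines
instance (lines : List Int) (out : Int) : Decidable (Spec_part1 lines out) := by unfold Spec_part1; infer_instance

-- ===== CLAIM (what is proved, stated in full; the proofs are below) =====
def Claim_equal_part1 : Prop := ∀ (lines : List Int), Dom_part1 lines → Pre_part1 lines → Spec_part1 lines (part1 lines)

-- ===== LEMMAS AND PROOFS =====

-- a chain with gaps ≤ 3 puts an element of s in every window (j, j+3] below an element of s
lemma chain_window (s : List Int) (prev : Int) (hc : List.IsChain (fun a b => b ≤ a + 3) (prev :: s))
    (j : Int) (hpj : prev ≤ j) (x : Int) (hx : x ∈ s) (hjx : j < x) :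
    ∃ y ∈ s, j < y ∧ y ≤ j + 3 := by
  induction s generalizing prev j with
  | nil => cases hx
  | cons h t ih =>
    rcases List.isChain_cons_cons.mp hc with ⟨hh, hct⟩
    by_cases hjh : j < h
    · exact ⟨h, List.mem_cons_self, hjh, by omega⟩
    · have hxt : x ∈ t := by
        rcases List.mem_cons.mp hx with rfl | h'
        · omega
        · exact h'
      obtain ⟨y, hy, h1, h2⟩ := ih h hct j (by omega) hxt hjx
      exact ⟨y, List.mem_cons_of_mem _ hy, h1, h2⟩

-- The heart of the proof: if s lists exactly the elements of `lines` above `jolts`, strictly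
-- increasing, then A's greedy loop from `jolts` computes B's fold over s started at prev = jolts.
lemma part1Loop_eq_foldl (lines : List Int) (M : Int)
    (hM : PySem.List.max? lines (fun x => x) = some M)
    (hPre : ∀ j : Int, 0 ≤ j → j < M → ∃ x ∈ lines, j < x ∧ x ≤ j + 3) :
    ∀ (s : List Int) (jolts : Int) (fuel : Nat) (d1 d3 : Int),
      0 ≤ jolts → (M - jolts).toNat ≤ fuel →
      s.Pairwise (· < ·) →
      (∀ x, x ∈ s ↔ x ∈ lines ∧ jolts < x) →
      part1Loop lines M fuel jolts d1 d3 =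
        ((s.foldl part1Step (d1, d3, jolts)).1, (s.foldl part1Step (d1, d3, jolts)).2.1) := by
  intro s
  induction s with
  | nil =>
    intro jolts fuel d1 d3 _h0 _hfuel _hp hchar
    have hMmem : M ∈ lines := PySem.List.max?_mem hM
    have hjM : ¬ jolts < M := by
      intro hlt
      exact absurd ((hchar M).mpr ⟨hMmem, hlt⟩) (List.not_mem_nil)
    cases fuel with
    | zero => simp [part1Loop]
    | succ f => simp [part1Loop, hjM]
  | cons h t ih =>
    intro jolts fuel d1 d3 h0 hfuel hp hchar
    have hh := (hchar h).mp (List.mem_cons_self)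
    have hhM : h ≤ M := PySem.List.max?_isMax hM h hh.1
    have hjM : jolts < M := lt_of_lt_of_le hh.2 hhM
    -- h is the least element of lines above jolts
    have hmin : ∀ x, x ∈ lines → jolts < x → h ≤ x := by
      intro x hx hjx
      have : x ∈ h :: t := (hchar x).mpr ⟨hx, hjx⟩
      rcases List.mem_cons.mp this with rfl | hxt
      · exact le_refl x
      · exact le_of_lt ((List.pairwise_cons.mp hp).1 x hxt)
    obtain ⟨w, hw, hjw, hw3⟩ := hPre jolts h0 hjM
    have hh3 : h ≤ jolts + 3 := le_trans (hmin w hw hjw) hw3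
    -- character of t after stepping to h
    have hchart : ∀ x, x ∈ t ↔ x ∈ lines ∧ h < x := by
      intro x
      constructor
      · intro hxt
        have hx := (hchar x).mp (List.mem_cons_of_mem _ hxt)
        exact ⟨hx.1, (List.pairwise_cons.mp hp).1 x hxt⟩
      · intro ⟨hx, hhx⟩
        have : x ∈ h :: t := (hchar x).mpr ⟨hx, lt_trans hh.2 hhx⟩
        rcases List.mem_cons.mp this with rfl | hxt
        · exact absurd hhx (lt_irrefl x)
        · exact hxt
    have hpt : t.Pairwise (· < ·) := (List.pairwise_cons.mp hp).2
    obtain ⟨f, rfl⟩ : ∃ f, fuel = f + 1 := by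
      cases fuel with
      | zero => exfalso; omega
      | succ f => exact ⟨f, rfl⟩
    have hfuel' : ∀ j' : Int, jolts + 1 ≤ j' → (M - j').toNat ≤ f := by intro j' hj'; omega
    by_cases hb1 : (jolts + 1) ∈ lines
    · have hheq : h = jolts + 1 := le_antisymm
        (hmin (jolts + 1) hb1 (by omega)) (by omega)
      rw [show part1Loop lines M (f+1) jolts d1 d3 = part1Loop lines M f (jolts+1) (d1+1) d3 from by
        simp [part1Loop, hjM, hb1]]
      rw [ih (jolts+1) f (d1+1) d3 (by omega) (hfuel' _ (by omega)) hpt (by rw [← hheq]; exact hchart)]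
      simp [List.foldl_cons, part1Step, hheq]
    · by_cases hb2 : (jolts + 2) ∈ lines
      · have hheq : h = jolts + 2 := by
          have hle : h ≤ jolts + 2 := hmin (jolts + 2) hb2 (by omega)
          have : h ≠ jolts + 1 := by rintro rfl; exact hb1 hh.1
          omega
        rw [show part1Loop lines M (f+1) jolts d1 d3 = part1Loop lines M f (jolts+2) d1 d3 from by
          simp [part1Loop, hjM, hb1, hb2]]
        rw [ih (jolts+2) f d1 d3 (by omega) (hfuel' _ (by omega)) hpt (by rw [← hheq]; exact hchart)]
        simp [List.foldl_cons, part1Step, hheq]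
      · have hheq : h = jolts + 3 := by
          have h1 : h ≠ jolts + 1 := by rintro rfl; exact hb1 hh.1
          have h2 : h ≠ jolts + 2 := by rintro rfl; exact hb2 hh.1
          omega
        have hb3 : (jolts + 3) ∈ lines := hheq ▸ hh.1
        rw [show part1Loop lines M (f+1) jolts d1 d3 = part1Loop lines M f (jolts+3) d1 (d3+1) from by
          simp [part1Loop, hjM, hb1, hb2, hb3]]
        rw [ih (jolts+3) f d1 (d3+1) (by omega) (hfuel' _ (by omega)) hpt (by rw [← hheq]; exact hchart)]
        simp [List.foldl_cons, part1Step, hheq]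

-- ===== VERDICT (by name: the statement is the Claim_ definition above) =====
theorem part1_spec : Claim_equal_part1 := by
  intro lines _hdom hpre
  unfold Spec_part1
  obtain ⟨hne, hwin⟩ := hpre
  obtain ⟨M, hM⟩ : ∃ M, PySem.List.max? lines (fun x => x) = some M := by
    cases hEq : PySem.List.max? lines (fun x => x) with
    | none => exact absurd ((PySem.List.max?_eq_none_iff lines (fun x => x)).mp hEq) hne
    | some m => exact ⟨m, rfl⟩
  have hmem : ∀ x, x ∈ PySem.List.sorted (PySem.Set.ofList (lines.filter (fun x => decide (0 < x)))) (fun x => x) false ↔ x ∈ lines ∧ (0:Int) < x := by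
    intro x
    rw [PySem.List.mem_sorted, PySem.Set.mem_ofList, List.mem_filter]
    simp
  have hnd : (PySem.List.sorted (PySem.Set.ofList (lines.filter (fun x => decide (0 < x)))) (fun x => x) false).Nodup :=
    (PySem.List.sorted_perm _ _ _).nodup_iff.mpr (PySem.Set.nodup_ofList _)
  have hple := PySem.List.sorted_pairwise (PySem.Set.ofList (lines.filter (fun x => decide (0 < x)))) (fun x => x)
  have hp : (PySem.List.sorted (PySem.Set.ofList (lines.filter (fun x => decide (0 < x)))) (fun x => x) false).Pairwise (· < ·) :=
    (List.Pairwise.and hple hnd).imp (fun h => lt_of_le_of_ne h.1 h.2)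
  have hwin' : ∀ j : Int, 0 ≤ j → j < M → ∃ x ∈ lines, j < x ∧ x ≤ j + 3 := by
    intro j h0 hjM
    have hMs : M ∈ PySem.List.sorted (PySem.Set.ofList (lines.filter (fun x => decide (0 < x)))) (fun x => x) false :=
      (hmem M).mpr ⟨PySem.List.max?_mem hM, by omega⟩
    obtain ⟨y, hy, h1, h2⟩ := chain_window _ 0 hwin j h0 M hMs hjM
    exact ⟨y, ((hmem y).mp hy).1, h1, h2⟩
  have key := part1Loop_eq_foldl lines M hM hwin'
    (PySem.List.sorted (PySem.Set.ofList (lines.filter (fun x => decide (0 < x)))) (fun x => x) false)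
    0 M.toNat 0 0 (le_refl 0) (by omega) hp hmem
  simp only [part1, part1_alt, hM, key]
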